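-- pv_equiv track=rewrite | github.com/jpshook/agentic-dev-interface | src/adi/engine/verifier.py | resolve_commands
-- ===== SOURCE A (Python) =====
-- def resolve_commands(
--
--     acceptance_checks: list[str],
--     repo_command_map: dict[str, str],
-- ) -> list[tuple[str, str]]:
--     """Resolve abstract checks to concrete repository commands."""
--     commands: list[tuple[str, str]] = []
--     missing: list[str] = []
--     for check in acceptance_checks:
--         command = repo_command_map.get(check)
--         if not command:
--             missing.append(check)
--             continue
--         commands.append((check, command))
--     if missing:
--         labels = ", ".join(sorted(missing))
--         raise ValueError(f"Missing repository command mappings for checks: {labels}")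
--     return commands
-- ===== SOURCE B (Python) =====
-- def resolve_commands(
--     acceptance_checks: list[str],
--     repo_command_map: dict[str, str],
-- ) -> list[tuple[str, str]]:
--     """Resolve abstract checks to concrete repository commands."""
--     missing = [c for c in acceptance_checks if not repo_command_map.get(c)]
--     if missing:
--         labels = ", ".join(sorted(missing))
--         raise ValueError(f"Missing repository command mappings for checks: {labels}")
--     return [(c, repo_command_map[c]) for c in acceptance_checks]
-- ===== Notes on version B (the rewrite author's own statement) =====
-- stated objective: simpler
-- what changed: Split A's single fused loop (which threads two accumulator lists) into a standalone validation pass over the checks followed by a separate construction comprehension.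
import Mathlib
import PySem

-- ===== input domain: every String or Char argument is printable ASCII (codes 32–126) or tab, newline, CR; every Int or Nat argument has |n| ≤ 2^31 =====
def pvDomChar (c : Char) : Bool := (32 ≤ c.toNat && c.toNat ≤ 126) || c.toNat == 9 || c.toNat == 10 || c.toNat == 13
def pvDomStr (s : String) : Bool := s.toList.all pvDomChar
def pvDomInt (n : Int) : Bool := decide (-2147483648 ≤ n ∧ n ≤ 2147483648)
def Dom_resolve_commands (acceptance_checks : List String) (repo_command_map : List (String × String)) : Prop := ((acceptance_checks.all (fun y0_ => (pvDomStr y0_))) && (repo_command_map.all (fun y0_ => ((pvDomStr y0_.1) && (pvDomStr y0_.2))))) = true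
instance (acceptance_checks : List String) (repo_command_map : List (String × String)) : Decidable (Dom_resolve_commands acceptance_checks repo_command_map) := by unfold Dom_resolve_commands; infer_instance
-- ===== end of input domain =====

-- B splits A's single fused loop into a standalone validation pass followed by a separate
-- construction pass (simpler decomposition; same cost). Pre_ excludes the inputs on which A
-- raises ValueError (some check with a missing or empty command); B raises identically there.

-- ===== PORT A =====
def resolve_commands (acceptance_checks : List String) (repo_command_map : List (String × String)) : List (String × String) :=
  let d := PySem.Dict.ofList repo_command_map
  let st := acceptance_checks.foldl (fun (st : List (String × String) × List String) check =>
    match d.get? check with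
    | none => (st.1, st.2 ++ [check])          -- command falsy (missing)
    | some command =>
      if command = "" then (st.1, st.2 ++ [check])   -- command falsy (empty)
      else (st.1 ++ [(check, command)], st.2)) ([], [])
  if st.2 ≠ [] then []   -- Python raises ValueError here; excluded by Pre_
  else st.1

-- ===== PORT B =====
def resolve_commands_alt (acceptance_checks : List String) (repo_command_map : List (String × String)) : List (String × String) :=
  let d := PySem.Dict.ofList repo_command_map
  let missing := acceptance_checks.filter (fun c => d.getD c "" = "")
  if missing ≠ [] then []   -- Python raises ValueError here; excluded by Pre_
  else acceptance_checks.map (fun c => (c, d.getD c ""))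

-- ===== PRECONDITION & SPEC =====
-- Pre_ excludes exactly the inputs on which A raises ValueError: some check whose mapped
-- command is missing or empty (falsy).
def Pre_resolve_commands (acceptance_checks : List String) (repo_command_map : List (String × String)) : Prop :=
  ∀ c ∈ acceptance_checks, (PySem.Dict.ofList repo_command_map).getD c "" ≠ ""
instance (acceptance_checks : List String) (repo_command_map : List (String × String)) : Decidable (Pre_resolve_commands acceptance_checks repo_command_map) := by unfold Pre_resolve_commands; infer_instance
def pvWitness_resolve_commands : List String × (List (String × String)) := (["lint", "test"], [("lint", "ruff check ."), ("test", "pytest")])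
def Spec_resolve_commands (acceptance_checks : List String) (repo_command_map : List (String × String)) (out : List (String × String)) : Prop := out = resolve_commands_alt acceptance_checks repo_command_map
instance (acceptance_checks : List String) (repo_command_map : List (String × String)) (out : List (String × String)) : Decidable (Spec_resolve_commands acceptance_checks repo_command_map out) := by unfold Spec_resolve_commands; infer_instance

-- ===== CLAIM (what is proved, stated in full; the proofs are below) =====
def Claim_equal_resolve_commands : Prop := ∀ (acceptance_checks : List String) (repo_command_map : List (String × String)), Dom_resolve_commands acceptance_checks repo_command_map → Pre_resolve_commands acceptance_checks repo_command_map → Spec_resolve_commands acceptance_checks repo_command_map (resolve_commands acceptance_checks repo_command_map)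

-- ===== LEMMAS AND PROOFS =====

-- A's fused loop, run over checks that all resolve, appends exactly the (check, command)
-- pairs to the first accumulator and leaves the second untouched.
theorem foldl_resolve (d : PySem.Dict String String) :
    ∀ (checks : List String) (acc : List (String × String)) (miss : List String),
    (∀ c ∈ checks, d.getD c "" ≠ "") →
    checks.foldl (fun (st : List (String × String) × List String) check =>
      match d.get? check with
      | none => (st.1, st.2 ++ [check])
      | some command =>
        if command = "" then (st.1, st.2 ++ [check])
        else (st.1 ++ [(check, command)], st.2)) (acc, miss)
      = (acc ++ checks.map (fun c => (c, d.getD c "")), miss) := by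
  intro checks
  induction checks with
  | nil => intro acc miss _; simp
  | cons c cs ih =>
    intro acc miss h
    have hc : d.getD c "" ≠ "" := h c (by simp)
    cases hg : d.get? c with
    | none => simp [PySem.Dict.getD_eq_get?_getD, hg] at hc
    | some v =>
      have hv : v ≠ "" := by simpa [PySem.Dict.getD_eq_get?_getD, hg] using hc
      have hgd : d.getD c "" = v := by simp [PySem.Dict.getD_eq_get?_getD, hg]
      simp only [List.foldl_cons, hg, if_neg hv]
      rw [ih (acc ++ [(c, v)]) miss (fun x hx => h x (by simp [hx]))]
      simp [hgd]

-- ===== VERDICT (by name: the statement is the Claim_ definition above) =====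
theorem resolve_commands_spec : Claim_equal_resolve_commands := by
  intro checks rmap _ hpre
  unfold Spec_resolve_commands resolve_commands resolve_commands_alt
  dsimp only
  have hfilter : checks.filter (fun c => (PySem.Dict.ofList rmap).getD c "" = "") = [] := by
    rw [List.filter_eq_nil_iff]
    intro c hc
    simpa using hpre c hc
  rw [foldl_resolve _ checks [] [] hpre]
  simp [hfilter]
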